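-- pv_equiv track=rewrite | github.com/gabozako/AlgoQueen | suy2on/CodingTest/3.py | solution
-- ===== SOURCE A (Python) =====
-- import collections
--
-- def solution(order):
--     main = collections.deque()  # queue
--     sub = []  # stack
--
--     i = 0
--
--     for j in range(1, len(order) + 1):
--         main.append(j)
--
--     while True:
--         # 서브벨트부터
--         while sub and sub[-1] == order[i]:
--             sub.pop()
--             i += 1
--
--         # 메인벨트
--         while main and order[i] != main[0]:
--             sub.append(main.popleft())
--
--         # 둘다 없는 경우
--         if not main:
--             return i
--
--         # 메인에 순서 있는 경우
--         else:
--             main.popleft()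
--             i += 1
-- ===== SOURCE B (Python) =====
-- def solution(order):
--     sub = []        # stack of boxes diverted from the main belt
--     main = 1        # next box number still on the main belt
--     i = 0
--     n = len(order)
--     while i < n:
--         if sub and sub[-1] == order[i]:
--             sub.pop()
--             i += 1
--         elif main <= n:
--             sub.append(main)
--             main += 1
--         else:
--             break
--     return i
-- ===== Notes on version B (the rewrite author's own statement) =====
-- stated objective: simpler
-- what changed: Replaces the materialised deque of 1..n and the three nested while-loops by a single integer counter for the next main-belt box, driving one flat loop that pops a matching stack top, pushes the counter, or stops.
import Mathlib
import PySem

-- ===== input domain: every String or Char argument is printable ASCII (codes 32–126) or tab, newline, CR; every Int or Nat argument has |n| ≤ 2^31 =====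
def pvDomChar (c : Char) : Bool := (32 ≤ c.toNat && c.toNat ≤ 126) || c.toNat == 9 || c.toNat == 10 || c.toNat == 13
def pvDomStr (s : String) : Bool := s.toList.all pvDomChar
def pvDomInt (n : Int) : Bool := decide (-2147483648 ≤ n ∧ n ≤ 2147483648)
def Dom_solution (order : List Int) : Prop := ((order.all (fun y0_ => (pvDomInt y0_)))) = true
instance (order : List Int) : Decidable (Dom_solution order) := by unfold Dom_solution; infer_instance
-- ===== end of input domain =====

-- B replaces A's materialised deque of 1..n and three nested while-loops by a single
-- integer counter for the next main-belt box and one flat loop (objective: simpler).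

-- ===== PORT A =====
-- inner loop `while sub and sub[-1] == order[i]`: the stack is kept top-at-head
-- (Python appends/pops at the end; same contents, same order of operations)
def subLoopA (order : List Int) (sub : List Int) (i : Int) : List Int × Int :=
  match sub with
  | [] => ([], i)
  | t :: rest =>
    if PySem.List.pyGet? order i = some t then subLoopA order rest (i + 1)
    else (t :: rest, i)

-- inner loop `while main and order[i] != main[0]`: the deque is kept front-at-head
def transferA (order : List Int) (i : Int) (main : List Int) (sub : List Int) :
    List Int × List Int :=
  match main with
  | [] => ([], sub)
  | m :: ms =>
    if PySem.List.pyGet? order i ≠ some m then transferA order i ms (m :: sub)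
    else (m :: ms, sub)

theorem transferA_fst_length_le (order : List Int) (i : Int) (main sub : List Int) :
    (transferA order i main sub).1.length ≤ main.length := by
  induction main generalizing sub with
  | nil => simp [transferA]
  | cons m ms ih =>
    simp only [transferA]
    split
    · exact Nat.le_succ_of_le (ih _)
    · exact Nat.le_refl _

-- the outer `while True` loop: run the two inner loops, then either return i
-- (`if not main`) or pop the main belt's front (`tail`) and advance i
def outerA (order : List Int) (main sub : List Int) (i : Int) : Int :=
  if (transferA order (subLoopA order sub i).2 main (subLoopA order sub i).1).1 = [] then
    (subLoopA order sub i).2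
  else
    outerA order (transferA order (subLoopA order sub i).2 main (subLoopA order sub i).1).1.tail
      (transferA order (subLoopA order sub i).2 main (subLoopA order sub i).1).2
      ((subLoopA order sub i).2 + 1)
termination_by main.length
decreasing_by
  rename_i hne
  have hle := transferA_fst_length_le order (subLoopA order sub i).2 main (subLoopA order sub i).1
  have hpos : (transferA order (subLoopA order sub i).2 main (subLoopA order sub i).1).1 ≠ [] := hne
  have := List.length_pos_iff.mpr hpos
  simp [List.length_tail]
  omega

def solution (order : List Int) : Int :=
  outerA order (PySem.List.pyRange 1 ((order.length : Int) + 1) 1) [] 0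

-- ===== PORT B =====
-- B's single flat loop; `mainC` is the counter `main`, stack kept top-at-head
def altLoop (order : List Int) (sub : List Int) (mainC i : Int) : Int :=
  if _h : i < (order.length : Int) then
    match sub with
    | t :: rest =>
      if PySem.List.pyGet? order i = some t then altLoop order rest mainC (i + 1)
      else if mainC ≤ (order.length : Int) then altLoop order (mainC :: t :: rest) (mainC + 1) i
      else i
    | [] =>
      if mainC ≤ (order.length : Int) then altLoop order [mainC] (mainC + 1) i
      else i
  else i
termination_by (((order.length : Int) + 1 - mainC).toNat + ((order.length : Int) - i).toNat)
decreasing_by all_goals omega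

def solution_alt (order : List Int) : Int := altLoop order [] 1 0

-- ===== PRECONDITION & SPEC =====
def Spec_solution (order : List Int) (out : Int) : Prop := out = solution_alt order
instance (order : List Int) (out : Int) : Decidable (Spec_solution order out) := by unfold Spec_solution; infer_instance

-- ===== CLAIM (what is proved, stated in full; the proofs are below) =====
def Claim_equal_solution : Prop := ∀ (order : List Int), Dom_solution order → Spec_solution order (solution order)

-- ===== LEMMAS AND PROOFS =====

theorem pyGet?_in (xs : List Int) (i : Int) (hi : 0 ≤ i) (hn : i < (xs.length : Int)) :
    PySem.List.pyGet? xs i = some (xs.getD i.toNat 0) := by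
  unfold PySem.List.pyGet? PySem.List.pyIdx?
  rw [if_pos hi, if_pos hn]
  simp [List.getD, List.getElem?_eq_getElem (by omega : i.toNat < xs.length)]

theorem pyGet?_out (xs : List Int) (i : Int) (hi : 0 ≤ i) (hn : (xs.length : Int) ≤ i) :
    PySem.List.pyGet? xs i = none := by
  unfold PySem.List.pyGet? PySem.List.pyIdx?
  rw [if_pos hi, if_neg (by omega)]
  rfl

-- when order[i] does not match the stack top, the sub loop stops at once
theorem subLoopA_stop (order : List Int) (sub : List Int) (i : Int)
    (h : ∀ t rest, sub = t :: rest → PySem.List.pyGet? order i ≠ some t) :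
    subLoopA order sub i = (sub, i) := by
  cases sub with
  | nil => rfl
  | cons t rest => simp [subLoopA, h t rest rfl]

-- with order[i] out of range the transfer loop empties the whole main belt
theorem transferA_all (order : List Int) (i : Int) (main sub : List Int)
    (h : PySem.List.pyGet? order i = none) :
    (transferA order i main sub).1 = [] := by
  induction main generalizing sub with
  | nil => rfl
  | cons m ms ih => simp [transferA, h, ih]

-- one unfolding of the outer loop when the transfer ends on a non-empty main belt
theorem outerA_cons (order main sub : List Int) (i i1 : Int) (sub1 : List Int)
    (m : Int) (ms sub2 : List Int)
    (h1 : subLoopA order sub i = (sub1, i1))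
    (h2 : transferA order i1 main sub1 = (m :: ms, sub2)) :
    outerA order main sub i = outerA order ms sub2 (i1 + 1) := by
  rw [outerA.eq_def]
  simp [h1, h2]

-- one unfolding of the outer loop when the transfer empties the main belt
theorem outerA_nil (order main sub : List Int) (i i1 : Int) (sub1 sub2 : List Int)
    (h1 : subLoopA order sub i = (sub1, i1))
    (h2 : transferA order i1 main sub1 = ([], sub2)) :
    outerA order main sub i = i1 := by
  rw [outerA.eq_def]
  simp [h1, h2]

-- A returns i as soon as i is past the end of order
theorem outerA_out (order : List Int) (main sub : List Int) (i : Int)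
    (hi : 0 ≤ i) (hn : (order.length : Int) ≤ i) :
    outerA order main sub i = i := by
  have hg := pyGet?_out order i hi hn
  have hs : subLoopA order sub i = (sub, i) :=
    subLoopA_stop order sub i (by intro t rest _ hc; rw [hg] at hc; simp at hc)
  have hall := transferA_all order i main sub hg
  obtain ⟨mf, ms2, hE⟩ : ∃ mf ms2, transferA order i main sub = (mf, ms2) := ⟨_, _, rfl⟩
  rw [hE] at hall
  simp at hall
  subst hall
  exact outerA_nil order main sub i i sub ms2 hs hE

-- the bridge: A with main = range c (n+1) equals B with counter c
theorem bridge (order : List Int) :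
    ∀ (k : Nat) (c i : Int) (sub : List Int), 0 ≤ i →
      (((order.length : Int) + 1 - c).toNat + ((order.length : Int) - i).toNat) = k →
      outerA order (PySem.List.pyRange c ((order.length : Int) + 1) 1) sub i
        = altLoop order sub c i := by
  intro k
  induction k using Nat.strong_induction_on with
  | _ k ih =>
    intro c i sub hi hk
    by_cases hlt : i < (order.length : Int)
    · have hg := pyGet?_in order i hi hlt
      set v := order.getD i.toNat 0 with hv
      cases sub with
      | cons t rest =>
        by_cases htv : t = v
        · -- stack top matches: both pop the stack and advance i
          have hstep : subLoopA order (t :: rest) i = subLoopA order rest (i + 1) := by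
            simp [subLoopA, hg, htv]
          have hsame : outerA order (PySem.List.pyRange c ((order.length : Int) + 1) 1) (t :: rest) i
              = outerA order (PySem.List.pyRange c ((order.length : Int) + 1) 1) rest (i + 1) := by
            rw [outerA.eq_def]
            conv_rhs => rw [outerA.eq_def]
            rw [hstep]
          rw [hsame, altLoop.eq_def]
          simp only [dif_pos hlt]
          rw [if_pos (by rw [hg, htv])]
          exact ih _ (by omega) c (i + 1) rest (by omega) rfl
        · have hst : subLoopA order (t :: rest) i = (t :: rest, i) := by
            apply subLoopA_stop
            intro t' rest' he hcc
            cases he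
            rw [hg] at hcc
            exact htv (Option.some.inj hcc).symm
          have hne : ¬ PySem.List.pyGet? order i = some t := by
            rw [hg]; exact fun hcc => htv (Option.some.inj hcc).symm
          by_cases hc : c ≤ (order.length : Int)
          · have hcons : PySem.List.pyRange c ((order.length : Int) + 1) 1
                = c :: PySem.List.pyRange (c + 1) ((order.length : Int) + 1) 1 :=
              PySem.List.pyRange_one_cons (by omega)
            by_cases hvc : v = c
            · -- main front matches: A ships from main, B pushes then pops
              have htr : transferA order i (c :: PySem.List.pyRange (c + 1) ((order.length : Int) + 1) 1) (t :: rest)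
                  = (c :: PySem.List.pyRange (c + 1) ((order.length : Int) + 1) 1, t :: rest) := by
                simp [transferA, hg, hvc]
              rw [hcons, outerA_cons order _ _ i i (t :: rest) c _ (t :: rest) hst htr]
              rw [altLoop.eq_def]
              simp only [dif_pos hlt]
              rw [if_neg hne, if_pos hc]
              rw [altLoop.eq_def]
              simp only [dif_pos hlt]
              rw [if_pos (by rw [hg, hvc])]
              exact ih _ (by omega) (c + 1) (i + 1) (t :: rest) (by omega) rfl
            · -- main front does not match: A diverts c to sub, B pushes c
              have hnc : ¬ PySem.List.pyGet? order i = some c := by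
                rw [hg]; exact fun hcc => hvc (Option.some.inj hcc)
              have htr : transferA order i (c :: PySem.List.pyRange (c + 1) ((order.length : Int) + 1) 1) (t :: rest)
                  = transferA order i (PySem.List.pyRange (c + 1) ((order.length : Int) + 1) 1) (c :: t :: rest) := by
                simp only [transferA]
                rw [if_pos hnc]
              have hst2 : subLoopA order (c :: t :: rest) i = (c :: t :: rest, i) := by
                apply subLoopA_stop
                intro t' rest' he hcc
                cases he
                exact hnc hcc
              have hA : outerA order (PySem.List.pyRange c ((order.length : Int) + 1) 1) (t :: rest) i
                  = outerA order (PySem.List.pyRange (c + 1) ((order.length : Int) + 1) 1) (c :: t :: rest) i := by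
                rw [outerA.eq_def]
                conv_rhs => rw [outerA.eq_def]
                rw [hcons, hst, hst2, htr]
              rw [hA, altLoop.eq_def]
              simp only [dif_pos hlt]
              rw [if_neg hne, if_pos hc]
              exact ih _ (by omega) (c + 1) i (c :: t :: rest) hi rfl
          · -- main belt exhausted and stack top does not match: both stop with i
            have hnil : PySem.List.pyRange c ((order.length : Int) + 1) 1 = [] :=
              PySem.List.pyRange_one_eq_nil (by omega)
            rw [hnil, outerA_nil order [] (t :: rest) i i (t :: rest) (t :: rest) hst rfl]
            rw [altLoop.eq_def]
            simp only [dif_pos hlt]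
            rw [if_neg hne, if_neg hc]
      | nil =>
        have hst : subLoopA order ([] : List Int) i = ([], i) := rfl
        by_cases hc : c ≤ (order.length : Int)
        · have hcons : PySem.List.pyRange c ((order.length : Int) + 1) 1
              = c :: PySem.List.pyRange (c + 1) ((order.length : Int) + 1) 1 :=
            PySem.List.pyRange_one_cons (by omega)
          by_cases hvc : v = c
          · have htr : transferA order i (c :: PySem.List.pyRange (c + 1) ((order.length : Int) + 1) 1) ([] : List Int)
                = (c :: PySem.List.pyRange (c + 1) ((order.length : Int) + 1) 1, []) := by
              simp [transferA, hg, hvc]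
            rw [hcons, outerA_cons order _ _ i i [] c _ [] hst htr]
            rw [altLoop.eq_def]
            simp only [dif_pos hlt]
            rw [if_pos hc]
            rw [altLoop.eq_def]
            simp only [dif_pos hlt]
            rw [if_pos (by rw [hg, hvc])]
            exact ih _ (by omega) (c + 1) (i + 1) ([] : List Int) (by omega) rfl
          · have hnc : ¬ PySem.List.pyGet? order i = some c := by
              rw [hg]; exact fun hcc => hvc (Option.some.inj hcc)
            have htr : transferA order i (c :: PySem.List.pyRange (c + 1) ((order.length : Int) + 1) 1) ([] : List Int)
                = transferA order i (PySem.List.pyRange (c + 1) ((order.length : Int) + 1) 1) [c] := by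
              simp only [transferA]
              rw [if_pos hnc]
            have hst2 : subLoopA order [c] i = ([c], i) := by
              apply subLoopA_stop
              intro t' rest' he hcc
              cases he
              exact hnc hcc
            have hA : outerA order (PySem.List.pyRange c ((order.length : Int) + 1) 1) ([] : List Int) i
                = outerA order (PySem.List.pyRange (c + 1) ((order.length : Int) + 1) 1) [c] i := by
              rw [outerA.eq_def]
              conv_rhs => rw [outerA.eq_def]
              rw [hcons, hst, hst2, htr]
            rw [hA, altLoop.eq_def]
            simp only [dif_pos hlt]
            rw [if_pos hc]
            exact ih _ (by omega) (c + 1) i [c] hi rfl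
        · have hnil : PySem.List.pyRange c ((order.length : Int) + 1) 1 = [] :=
            PySem.List.pyRange_one_eq_nil (by omega)
          rw [hnil, outerA_nil order [] [] i i [] [] hst rfl]
          rw [altLoop.eq_def]
          simp only [dif_pos hlt]
          rw [if_neg hc]
    · -- i past the end: both return i
      rw [outerA_out order _ sub i hi (by omega)]
      rw [altLoop.eq_def]
      rw [dif_neg hlt]

-- ===== VERDICT (by name: the statement is the Claim_ definition above) =====
theorem solution_spec : Claim_equal_solution := by
  intro order _
  unfold Spec_solution solution solution_alt
  exact bridge order _ 1 0 [] (by omega) rfl
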